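-- pv_equiv track=rewrite | github.com/RaghavgitGrover/XV6_Part2_and_Concurrency | concurrency/Distributed-Sorting/test.py | is_sorted_by_timestamp
-- ===== SOURCE A (Python) =====
-- def is_sorted_by_timestamp(output_lines):
--     """Check if output is sorted by timestamp."""
--     prev_timestamp = ""
--     for line in output_lines:
--         parts = line.strip().split()
--         if len(parts) < 3:
--             continue
--         curr_timestamp = parts[2]
--         if curr_timestamp < prev_timestamp and prev_timestamp != "":
--             return False
--         prev_timestamp = curr_timestamp
--     return True
-- ===== SOURCE B (Python) =====
-- def is_sorted_by_timestamp(output_lines):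
--     """Check if output is sorted by timestamp."""
--     timestamps = [parts[2]
--                   for parts in (line.strip().split() for line in output_lines)
--                   if len(parts) >= 3]
--     return timestamps == sorted(timestamps)
-- ===== Notes on version B (the rewrite author's own statement) =====
-- stated objective: alternative
-- what changed: Replaces the fused prev-timestamp scan with early return by extracting the timestamp column and testing it with sort-and-compare (ts == sorted(ts)) instead of any adjacent comparison.
import Mathlib
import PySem

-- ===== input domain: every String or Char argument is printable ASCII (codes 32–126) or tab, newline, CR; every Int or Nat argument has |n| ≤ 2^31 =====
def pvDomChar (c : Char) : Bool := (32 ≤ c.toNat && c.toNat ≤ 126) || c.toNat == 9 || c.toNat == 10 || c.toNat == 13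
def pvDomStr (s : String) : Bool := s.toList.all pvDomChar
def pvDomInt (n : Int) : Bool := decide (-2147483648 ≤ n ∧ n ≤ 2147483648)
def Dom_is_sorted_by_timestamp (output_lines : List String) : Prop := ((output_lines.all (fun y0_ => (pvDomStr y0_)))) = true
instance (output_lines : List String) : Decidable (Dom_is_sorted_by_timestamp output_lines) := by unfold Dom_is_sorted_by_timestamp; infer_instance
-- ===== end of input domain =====

-- ===== PORT A =====
-- B replaces A's fused prev-timestamp scan by sort-and-compare on the extracted timestamp column; same return value, not faster.

-- the loop of A: threads prev_timestamp, returns False early on an out-of-order pair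
def pvALoop (prev : String) : List String → Bool
  | [] => true
  | line :: rest =>
    let parts := PySem.Str.split₀ (PySem.Str.strip line)
    if parts.length < 3 then pvALoop prev rest
    else
      -- parts[2]: in range here since ¬ (parts.length < 3)
      let curr := parts.getD 2 ""
      if curr < prev ∧ prev ≠ "" then false
      else pvALoop curr rest

def is_sorted_by_timestamp (output_lines : List String) : Bool :=
  pvALoop "" output_lines

-- ===== PORT B =====
-- the comprehension of Source B: the timestamp column (parts[2] of each line with at least 3 fields)
def pvTimestamps (output_lines : List String) : List String :=
  (output_lines.map (fun line => PySem.Str.split₀ (PySem.Str.strip line))).filterMap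
    (fun parts => if 3 ≤ parts.length then parts[2]? else none)

-- Source B: timestamps == sorted(timestamps)
def is_sorted_by_timestamp_alt (output_lines : List String) : Bool :=
  let ts := pvTimestamps output_lines
  decide (ts = PySem.List.sorted ts (fun x => x) false)

-- ===== PRECONDITION & SPEC =====
def Spec_is_sorted_by_timestamp (output_lines : List String) (out : Bool) : Prop := out = is_sorted_by_timestamp_alt output_lines
instance (output_lines : List String) (out : Bool) : Decidable (Spec_is_sorted_by_timestamp output_lines out) := by unfold Spec_is_sorted_by_timestamp; infer_instance

-- ===== CLAIM (what is proved, stated in full; the proofs are below) =====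
def Claim_equal_is_sorted_by_timestamp : Prop := ∀ (output_lines : List String), Dom_is_sorted_by_timestamp output_lines → Spec_is_sorted_by_timestamp output_lines (is_sorted_by_timestamp output_lines)

-- ===== LEMMAS AND PROOFS =====

-- adjacent-pair check characterising A's loop body
def pvChk : List String → Bool
  | a :: b :: t => decide (a ≤ b) && pvChk (b :: t)
  | _ => true

theorem pvString_not_lt_empty (t : String) : ¬ (t < "") := by simp

theorem pvALoop_eq_chk (ls : List String) : ∀ prev : String,
    pvALoop prev ls = pvChk (prev :: pvTimestamps ls) := by
  induction ls with
  | nil => intro prev; rfl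
  | cons line rest ih =>
    intro prev
    by_cases hlen : (PySem.Str.split₀ (PySem.Str.strip line)).length < 3
    · have hts : pvTimestamps (line :: rest) = pvTimestamps rest := by
        simp only [pvTimestamps, List.map_cons, List.filterMap_cons]
        rw [if_neg (by omega)]
      simp only [pvALoop]
      rw [if_pos hlen, hts, ih prev]
    · have h2 : 2 < (PySem.Str.split₀ (PySem.Str.strip line)).length := by omega
      have hget : (PySem.Str.split₀ (PySem.Str.strip line)).getD 2 "" =
          (PySem.Str.split₀ (PySem.Str.strip line))[2] := by
        simp [List.getD, List.getElem?_eq_getElem h2]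
      set curr := (PySem.Str.split₀ (PySem.Str.strip line))[2] with hcurr
      have hts : pvTimestamps (line :: rest) = curr :: pvTimestamps rest := by
        simp only [pvTimestamps, List.map_cons]
        rw [List.filterMap_cons_some (b := curr)
          (by rw [if_pos (by omega), List.getElem?_eq_getElem h2])]
      simp only [pvALoop]
      rw [if_neg hlen, hget, hts]
      have hchk : pvChk (prev :: curr :: pvTimestamps rest) =
          (decide (prev ≤ curr) && pvChk (curr :: pvTimestamps rest)) := rfl
      rw [hchk]
      by_cases hprev : prev = ""
      · subst hprev
        rw [if_neg (fun h => pvString_not_lt_empty curr h.1), ih curr]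
        have hle : decide (("" : String) ≤ curr) = true := by
          simp [le_of_not_gt (pvString_not_lt_empty curr)]
        simp only [hle, Bool.true_and]
      · by_cases hlt : curr < prev
        · rw [if_pos ⟨hlt, hprev⟩]
          have hnle : decide (prev ≤ curr) = false := by simp [not_le.mpr hlt]
          simp only [hnle, Bool.false_and]
        · rw [if_neg (fun h => hlt h.1), ih curr]
          have hle : decide (prev ≤ curr) = true := by simp [le_of_not_gt hlt]
          simp only [hle, Bool.true_and]

theorem pvPairwise_cons_cons (a b : String) (t : List String) :
    List.Pairwise (· ≤ ·) (a :: b :: t) ↔ a ≤ b ∧ List.Pairwise (· ≤ ·) (b :: t) := by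
  constructor
  · intro h
    rcases List.pairwise_cons.mp h with ⟨h1, h2⟩
    exact ⟨h1 b (by simp), h2⟩
  · rintro ⟨h1, h2⟩
    refine List.pairwise_cons.mpr ⟨?_, h2⟩
    intro x hx
    rcases List.mem_cons.mp hx with rfl | hx
    · exact h1
    · exact le_trans h1 ((List.pairwise_cons.mp h2).1 x hx)

theorem pvChk_iff_pairwise (ts : List String) :
    pvChk ts = true ↔ ts.Pairwise (· ≤ ·) := by
  match ts with
  | [] => simp [pvChk]
  | [a] => simp [pvChk]
  | a :: b :: t =>
    rw [pvPairwise_cons_cons, ← pvChk_iff_pairwise (b :: t)]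
    simp [pvChk]

-- ts == sorted(ts) holds exactly when ts is non-decreasing
theorem pvSorted_self_iff (ts : List String) :
    (ts = PySem.List.sorted ts (fun x => x) false) ↔ ts.Pairwise (· ≤ ·) := by
  constructor
  · intro h
    have := PySem.List.sorted_pairwise ts (fun x => x)
    rw [← h] at this
    exact this
  · intro h
    exact (PySem.List.sorted_eq_self_of_pairwise ts (fun x => x) h).symm

-- ===== VERDICT (by name: the statement is the Claim_ definition above) =====
theorem is_sorted_by_timestamp_spec : Claim_equal_is_sorted_by_timestamp := by
  intro ls _
  show is_sorted_by_timestamp ls = is_sorted_by_timestamp_alt ls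
  rw [is_sorted_by_timestamp, is_sorted_by_timestamp_alt, pvALoop_eq_chk]
  have hB : (decide (pvTimestamps ls = PySem.List.sorted (pvTimestamps ls) (fun x => x) false))
      = pvChk (pvTimestamps ls) := by
    rcases Bool.eq_false_or_eq_true (pvChk (pvTimestamps ls)) with ht | hf
    · rw [ht]
      exact decide_eq_true ((pvSorted_self_iff _).mpr ((pvChk_iff_pairwise _).mp ht))
    · rw [hf]
      exact decide_eq_false (fun hEq =>
        absurd ((pvChk_iff_pairwise _).mpr ((pvSorted_self_iff _).mp hEq)) (by simp [hf]))
  rw [hB]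
  cases h : pvTimestamps ls with
  | nil => rfl
  | cons a t =>
    have hle : decide (("" : String) ≤ a) = true := by
      simp [le_of_not_gt (pvString_not_lt_empty a)]
    show (decide (("" : String) ≤ a) && pvChk (a :: t)) = pvChk (a :: t)
    simp only [hle, Bool.true_and]
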